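-- pv_equiv track=rewrite | github.com/vuk1011/AoC2023 | Day1/utils.py | get_first_word_index
-- ===== SOURCE A (Python) =====
-- replacements = {"one": "1",
--                 "two": "2",
--                 "three": "3",
--                 "four": "4",
--                 "five": "5",
--                 "six": "6",
--                 "seven": "7",
--                 "eight": "8",
--                 "nine": "9"}
--
-- def get_first_word_index(line: str) -> int:
--     positions = []
--     for value in replacements:
--         try:
--             positions.append(line.index(value))
--         except Exception:
--             pass
--     if len(positions) == 0:
--         return -1
--     else:
--         return min(positions)
-- ===== SOURCE B (Python) =====
-- WORDS = ("one", "two", "three", "four", "five", "six", "seven", "eight", "nine")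
--
--
-- def get_first_word_index(line: str) -> int:
--     for i in range(len(line)):
--         for word in WORDS:
--             if line.startswith(word, i):
--                 return i
--     return -1
-- ===== Notes on version B (the rewrite author's own statement) =====
-- stated objective: alternative
-- what changed: Instead of running line.index once per word (each a full scan) and taking the min of the collected positions, B makes a single left-to-right scan and returns the first position at which any of the nine words starts.
import Mathlib
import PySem

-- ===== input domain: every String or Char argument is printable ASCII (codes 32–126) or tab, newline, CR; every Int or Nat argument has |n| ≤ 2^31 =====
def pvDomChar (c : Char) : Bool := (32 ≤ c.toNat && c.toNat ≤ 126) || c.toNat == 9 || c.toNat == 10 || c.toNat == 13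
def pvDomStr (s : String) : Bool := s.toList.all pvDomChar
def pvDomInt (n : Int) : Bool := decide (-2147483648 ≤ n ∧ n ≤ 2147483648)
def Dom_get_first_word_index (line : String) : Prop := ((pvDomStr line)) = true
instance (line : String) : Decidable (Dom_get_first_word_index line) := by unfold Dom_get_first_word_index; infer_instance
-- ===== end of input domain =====

-- B replaces A's per-word full-string index+min with a single left-to-right scan returning the
-- first position where any digit word starts (alternative decomposition, same result).

-- ===== PORT A =====
-- the keys of `replacements`, in insertion order
def pvWordsA : List String := ["one", "two", "three", "four", "five", "six", "seven", "eight", "nine"]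

def get_first_word_index (line : String) : Int :=
  -- for value in replacements: try: positions.append(line.index(value)) except: pass
  -- line.index raises exactly when find = -1, and the except swallows it.
  let positions := pvWordsA.foldl (fun acc w =>
      let i := PySem.Str.find line w
      if i = -1 then acc else acc ++ [i]) []
  if positions.length = 0 then -1
  else (PySem.List.min? positions (fun x => x)).getD (-1)  -- min(positions); positions ≠ [] here, so default unreachable

-- ===== PORT B =====
def pvWordsB : List (List Char) :=
  ["one".toList, "two".toList, "three".toList, "four".toList, "five".toList,
   "six".toList, "seven".toList, "eight".toList, "nine".toList]

-- line.startswith(word, i) for 0 ≤ i ≤ len(line) is exactly startswith on the i-th suffix,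
-- so the index loop walks the suffixes of line (exact on all inputs).
def pvScan : List Char → Nat → Int
  | [], _ => -1
  | c :: rest, i =>
      if pvWordsB.any (fun w => PySem.Chars.startswith (c :: rest) w) then (i : Int)
      else pvScan rest (i + 1)

def get_first_word_index_alt (line : String) : Int := pvScan line.toList 0

-- ===== PRECONDITION & SPEC =====
def Spec_get_first_word_index (line : String) (out : Int) : Prop := out = get_first_word_index_alt line
instance (line : String) (out : Int) : Decidable (Spec_get_first_word_index line out) := by unfold Spec_get_first_word_index; infer_instance

-- ===== CLAIM (what is proved, stated in full; the proofs are below) =====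
def Claim_equal_get_first_word_index : Prop := ∀ (line : String), Dom_get_first_word_index line → Spec_get_first_word_index line (get_first_word_index line)

-- ===== LEMMAS AND PROOFS =====

theorem pvWords_map : pvWordsA.map String.toList = pvWordsB := by decide

theorem pvWordsB_ne_nil : ∀ w ∈ pvWordsB, w ≠ [] := by decide

-- if no word occurs anywhere in cs, the scan falls off the end
theorem pvScan_none (cs : List Char) (i : Nat)
    (h : ∀ w ∈ pvWordsB, ¬ w <:+: cs) : pvScan cs i = -1 := by
  induction cs generalizing i with
  | nil => rfl
  | cons c rest ih =>
    have hany : pvWordsB.any (fun w => PySem.Chars.startswith (c :: rest) w) = false := by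
      rw [List.any_eq_false]
      intro w hw
      simp only [Bool.not_eq_true]
      rw [← Bool.not_eq_true, PySem.Chars.startswith_iff]
      intro hp
      exact h w hw hp.isInfix
    rw [pvScan, hany]
    simp only [Bool.false_eq_true, if_false]
    exact ih (i + 1) (fun w hw hinf => h w hw (hinf.trans (List.suffix_cons c rest).isInfix))

-- if j is the first position where some word starts, the scan returns i + j
theorem pvScan_hit (cs : List Char) (i j : Nat)
    (hj : pvWordsB.any (fun w => PySem.Chars.startswith (cs.drop j) w) = true)
    (hmin : ∀ k < j, pvWordsB.any (fun w => PySem.Chars.startswith (cs.drop k) w) = false) :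
    pvScan cs i = ((i + j : Nat) : Int) := by
  induction cs generalizing i j with
  | nil =>
    exfalso
    rw [List.drop_nil, List.any_eq_true] at hj
    obtain ⟨w, hw, hs⟩ := hj
    rw [PySem.Chars.startswith_iff] at hs
    exact pvWordsB_ne_nil w hw (List.prefix_nil.mp hs)
  | cons c rest ih =>
    cases j with
    | zero =>
      rw [List.drop_zero] at hj
      rw [pvScan, hj]
      simp
    | succ j' =>
      have h0 := hmin 0 (Nat.succ_pos j')
      rw [List.drop_zero] at h0
      rw [pvScan, h0]
      simp only [Bool.false_eq_true, if_false]
      have := ih (i + 1) j' (by simpa using hj)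
        (fun k hk => by simpa using hmin (k + 1) (by omega))
      rw [this]
      congr 1
      omega

-- A's positions list, in closed form
theorem pvPositions_eq (line : String) :
    pvWordsA.foldl (fun acc w =>
        let i := PySem.Str.find line w
        if i = -1 then acc else acc ++ [i]) [] =
      (pvWordsA.filter (fun w => decide (¬ PySem.Str.find line w = -1))).map
        (fun w => PySem.Str.find line w) := by
  have hfun : (fun (acc : List Int) (w : String) =>
      let i := PySem.Str.find line w
      if i = -1 then acc else acc ++ [i]) =
      (fun acc w => if ¬ PySem.Str.find line w = -1 then acc ++ [PySem.Str.find line w] else acc) := by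
    funext acc w
    by_cases h : PySem.Str.find line w = -1
    · rw [if_pos h, if_neg (not_not_intro h)]
    · rw [if_neg h, if_pos h]
  rw [hfun, PySem.List.foldl_append_ite]
  simp

-- membership in positions ↔ an occurring word with that find value
theorem pvMem_positions (line : String) (y : Int) :
    (y ∈ (pvWordsA.filter (fun w => decide (¬ PySem.Str.find line w = -1))).map
        (fun w => PySem.Str.find line w)) ↔
      ∃ w ∈ pvWordsA, PySem.Str.find line w ≠ -1 ∧ PySem.Str.find line w = y := by
  simp only [List.mem_map, List.mem_filter, decide_not, Bool.not_eq_eq_eq_not, Bool.not_true,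
    decide_eq_false_iff_not]
  constructor
  · rintro ⟨w, ⟨hw, hne⟩, hy⟩; exact ⟨w, hw, hne, hy⟩
  · rintro ⟨w, hw, hne, hy⟩; exact ⟨w, ⟨hw, hne⟩, hy⟩

theorem get_first_word_index_agrees (line : String) :
    get_first_word_index line = get_first_word_index_alt line := by
  unfold get_first_word_index get_first_word_index_alt
  rw [pvPositions_eq]
  set cs := line.toList with hcs
  by_cases hocc : ∃ w ∈ pvWordsA, PySem.Str.find line w ≠ -1
  · -- some word occurs: A returns the min, B finds the same position
    obtain ⟨w0, hw0, hne0⟩ := hocc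
    have hmem0 : PySem.Str.find line w0 ∈
        (pvWordsA.filter (fun w => decide (¬ PySem.Str.find line w = -1))).map
          (fun w => PySem.Str.find line w) :=
      (pvMem_positions line _).mpr ⟨w0, hw0, hne0, rfl⟩
    set ps := (pvWordsA.filter (fun w => decide (¬ PySem.Str.find line w = -1))).map
        (fun w => PySem.Str.find line w) with hps
    have hne : ps ≠ [] := fun h => by rw [h] at hmem0; exact (List.not_mem_nil) hmem0
    obtain ⟨m, hm⟩ : ∃ m, PySem.List.min? ps (fun x => x) = some m := by
      cases h : PySem.List.min? ps (fun x => x) with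
      | none => exact absurd ((PySem.List.min?_eq_none_iff ps (fun x => x)).mp h) hne
      | some m => exact ⟨m, rfl⟩
    have hmmem := PySem.List.min?_mem hm
    have hmmin := PySem.List.min?_isMin hm
    obtain ⟨wm, hwm, hwmne, hwmv⟩ := (pvMem_positions line m).mp hmmem
    -- m = find line wm, 0 ≤ m
    have hfindeq : ∀ w : String, PySem.Str.find line w = PySem.Chars.find cs w.toList :=
      fun w => by rw [PySem.Str.find_eq]
    have hm0 : 0 ≤ m := by
      have h1 := PySem.Chars.neg_one_le_find cs wm.toList
      rw [hfindeq] at hwmne hwmv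
      omega
    have hspec := PySem.Chars.find_spec (s := cs) (sub := wm.toList) (by rw [← hwmv] at hm0; exact hm0)
    rw [← hfindeq wm, hwmv] at hspec
    obtain ⟨hpref, _⟩ := hspec
    have hwmB : wm.toList ∈ pvWordsB := by
      rw [← pvWords_map]; exact List.mem_map_of_mem hwm
    have hj : pvWordsB.any (fun w => PySem.Chars.startswith (cs.drop m.toNat) w) = true := by
      rw [List.any_eq_true]
      exact ⟨wm.toList, hwmB, (PySem.Chars.startswith_iff _ _).mpr hpref⟩
    have hminpos : ∀ k < m.toNat,
        pvWordsB.any (fun w => PySem.Chars.startswith (cs.drop k) w) = false := by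
      intro k hk
      rw [List.any_eq_false]
      intro w hw
      simp only [Bool.not_eq_true]
      rw [← Bool.not_eq_true, PySem.Chars.startswith_iff]
      intro hp
      -- w starts at k, so w occurs in cs and find ≤ k < m.toNat ≤ find: contradiction with min
      obtain ⟨aw, haw, hawt⟩ : ∃ aw ∈ pvWordsA, aw.toList = w := by
        have : w ∈ pvWordsA.map String.toList := by rw [pvWords_map]; exact hw
        simpa [List.mem_map] using this
      subst hawt
      have hinf : aw.toList <:+: cs := hp.isInfix.trans (List.drop_suffix k cs).isInfix
      have hfne : PySem.Chars.find cs aw.toList ≠ -1 := (PySem.Chars.find_ne_neg_one_iff cs aw.toList).mpr hinf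
      have hfmem : PySem.Str.find line aw ∈ ps :=
        (pvMem_positions line _).mpr ⟨aw, haw, by rw [hfindeq]; exact hfne, rfl⟩
      have hmle : m ≤ PySem.Str.find line aw := hmmin _ hfmem
      have hf0 : 0 ≤ PySem.Chars.find cs aw.toList := by
        have := PySem.Chars.neg_one_le_find cs aw.toList; omega
      obtain ⟨_, hfmin⟩ := PySem.Chars.find_spec (s := cs) (sub := aw.toList) hf0
      have hklt : k < (PySem.Chars.find cs aw.toList).toNat := by
        rw [hfindeq] at hmle
        omega
      exact hfmin k hklt hp
    have hB := pvScan_hit cs 0 m.toNat hj hminpos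
    have hlen : ps.length ≠ 0 := fun h => hne (List.length_eq_zero_iff.mp h)
    show (if ps.length = 0 then (-1 : Int) else (PySem.List.min? ps (fun x => x)).getD (-1)) = pvScan cs 0
    rw [if_neg hlen, hm, Option.getD_some, hB]
    omega
  · -- no word occurs: positions is empty, and the scan never fires
    rw [not_exists] at hocc
    simp only [not_and, not_not, ne_eq] at hocc
    have hfilter : pvWordsA.filter (fun w => decide (¬ PySem.Str.find line w = -1)) = [] := by
      rw [List.filter_eq_nil_iff]
      intro w hw
      have h1 := hocc w hw
      rw [PySem.Str.find_eq] at h1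
      simp [h1]
    rw [hfilter]
    show (-1 : Int) = pvScan cs 0
    symm
    apply pvScan_none
    intro w hw hinf
    obtain ⟨aw, haw, hawt⟩ : ∃ aw ∈ pvWordsA, aw.toList = w := by
      have : w ∈ pvWordsA.map String.toList := by rw [pvWords_map]; exact hw
      simpa [List.mem_map] using this
    subst hawt
    have := hocc aw haw
    rw [PySem.Str.find_eq] at this
    exact ((PySem.Chars.find_ne_neg_one_iff cs aw.toList).mpr hinf) this

-- ===== VERDICT (by name: the statement is the Claim_ definition above) =====
theorem get_first_word_index_spec : Claim_equal_get_first_word_index := by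
  intro line _
  unfold Spec_get_first_word_index
  exact (get_first_word_index_agrees line)
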